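-- pv_equiv track=rewrite | github.com/Zouhair010/Timer_stopwatch | chronometer.py | convertChronometerValue
-- ===== SOURCE A (Python) =====
-- def convertChronometerValue(chronoValue):
--     timeParts = [0,0,0,0]
--     tracker = -1
--     part = ""
--     for i in range(len(chronoValue)-1,-1,-1):
--         if chronoValue[i].isdigit():
--             part = chronoValue[i]+part
--         else:
--             timeParts[tracker] = int(part)
--             tracker -= 1
--             part = ""
--     timeParts[tracker] = int(part)
--     return timeParts
-- ===== SOURCE B (Python) =====
-- def convertChronometerValue(chronoValue):
--     # Phase 1: forward tokenize into digit-run segments (empty runs kept).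
--     segments = []
--     current = ""
--     for ch in chronoValue:
--         if ch.isdigit():
--             current += ch
--         else:
--             segments.append(current)
--             current = ""
--     segments.append(current)
--     # Phase 2: place int(segment) values back-to-front into [0,0,0,0].
--     result = [0, 0, 0, 0]
--     tracker = -1
--     for seg in reversed(segments):
--         result[tracker] = int(seg)
--         tracker -= 1
--     return result
-- ===== Notes on version B (the rewrite author's own statement) =====
-- stated objective: alternative
-- what changed: A parses with a single fused backward index scan that converts and places each digit run as soon as a separator is hit; B first tokenizes the string forward into a list of digit-run segments and then, in a separate pass, places int(segment) back-to-front into [0,0,0,0].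
-- outside the precondition, e.g. on convertChronometerValue(''): A raises ValueError, B raises ValueError
import Mathlib
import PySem

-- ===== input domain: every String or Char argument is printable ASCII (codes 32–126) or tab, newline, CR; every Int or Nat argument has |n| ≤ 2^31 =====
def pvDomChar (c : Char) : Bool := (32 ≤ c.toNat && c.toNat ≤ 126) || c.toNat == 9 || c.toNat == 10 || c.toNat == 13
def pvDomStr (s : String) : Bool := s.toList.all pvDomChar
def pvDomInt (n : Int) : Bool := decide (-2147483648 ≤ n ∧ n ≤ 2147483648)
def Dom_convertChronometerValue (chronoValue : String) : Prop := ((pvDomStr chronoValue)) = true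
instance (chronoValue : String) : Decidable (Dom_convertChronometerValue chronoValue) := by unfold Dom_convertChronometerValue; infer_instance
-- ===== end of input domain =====

-- B replaces A's single fused right-to-left scan (parse-and-place as it goes) by a two-phase
-- forward tokenizer (collect digit-run segments, then place int(segment) back-to-front);
-- objective: alternative decomposition, same cost.

-- ===== PORT A =====
-- loop body of A's backward index scan (state: timeParts, tracker, part; none = raised)
def stepA (cs : List Char) (st : Option (List Int × Int × List Char)) (i : Int) :
    Option (List Int × Int × List Char) :=
  match st with
  | none => none
  | some (timeParts, tracker, part) =>
    match PySem.List.pyGet? cs i with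
    | none => none
    | some c =>
      if PySem.Chars.isdigit c then some (timeParts, tracker, c :: part)
      else
        match PySem.Int.ofChars? part with
        | none => none
        | some v =>
          match PySem.List.pySet? timeParts tracker v with
          | none => none
          | some tp => some (tp, tracker - 1, ([] : List Char))

def convertChronometerValue (chronoValue : String) : List Int :=
  match (PySem.List.pyRange (PySem.Str.len chronoValue - 1) (-1) (-1)).foldl
      (stepA chronoValue.toList) (some ([0, 0, 0, 0], -1, ([] : List Char))) with
  | none => []
  | some (timeParts, tracker, part) =>
    match PySem.Int.ofChars? part with
    | none => []
    | some v => (PySem.List.pySet? timeParts tracker v).getD []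

-- ===== PORT B =====
-- phase-1 loop body: extend the current digit run or close a segment
def tokB (p : List (List Char) × List Char) (ch : Char) : List (List Char) × List Char :=
  if PySem.Chars.isdigit ch then (p.1, p.2 ++ [ch]) else (p.1 ++ [p.2], ([] : List Char))

-- phase-2 loop body: result[tracker] = int(seg); tracker -= 1  (none = raised)
def placeB (st : Option (List Int × Int)) (seg : List Char) : Option (List Int × Int) :=
  match st with
  | none => none
  | some (result, tracker) =>
    match PySem.Int.ofChars? seg with
    | none => none
    | some v =>
      match PySem.List.pySet? result tracker v with
      | none => none
      | some r => some (r, tracker - 1)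

def convertChronometerValue_alt (chronoValue : String) : List Int :=
  match ((chronoValue.toList.foldl tokB ([], [])).1 ++
      [(chronoValue.toList.foldl tokB ([], [])).2]).reverse.foldl placeB
      (some ([0, 0, 0, 0], -1)) with
  | none => []
  | some (result, _) => result

-- ===== PRECONDITION & SPEC =====
-- Pre_ excludes exactly the inputs where Python A raises: an empty string or a leading/trailing/
-- doubled separator makes int('') raise ValueError, and more than 3 separators makes
-- timeParts[tracker] raise IndexError.
def Pre_convertChronometerValue (chronoValue : String) : Prop :=
  chronoValue.toList ≠ [] ∧
  PySem.Chars.isdigit chronoValue.toList.headI = true ∧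
  PySem.Chars.isdigit chronoValue.toList.reverse.headI = true ∧
  (chronoValue.toList.zip chronoValue.toList.tail).all
    (fun p => PySem.Chars.isdigit p.1 || PySem.Chars.isdigit p.2) = true ∧
  chronoValue.toList.countP (fun c => !PySem.Chars.isdigit c) ≤ 3
instance (chronoValue : String) : Decidable (Pre_convertChronometerValue chronoValue) := by
  unfold Pre_convertChronometerValue; infer_instance

def pvWitness_convertChronometerValue : String := "1:23:45"

def Spec_convertChronometerValue (chronoValue : String) (out : List Int) : Prop :=
  out = convertChronometerValue_alt chronoValue
instance (chronoValue : String) (out : List Int) : Decidable (Spec_convertChronometerValue chronoValue out) := by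
  unfold Spec_convertChronometerValue; infer_instance

-- ===== CLAIM (what is proved, stated in full; the proofs are below) =====
def Claim_equal_convertChronometerValue : Prop := ∀ (chronoValue : String), Dom_convertChronometerValue chronoValue → Pre_convertChronometerValue chronoValue → Spec_convertChronometerValue chronoValue (convertChronometerValue chronoValue)

-- ===== LEMMAS AND PROOFS =====

-- the digit-run segments of cs, leftmost first; always nonempty, empty runs kept
def segR : List Char → List (List Char)
  | [] => [[]]
  | c :: cs =>
    if PySem.Chars.isdigit c then
      match segR cs with
      | [] => [[c]]
      | h :: t => (c :: h) :: t
    else [] :: segR cs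

-- append p to the last element of a segment list
def appLast : List (List Char) → List Char → List (List Char)
  | [], p => [p]
  | [x], p => [x ++ p]
  | x :: y :: xs, p => x :: appLast (y :: xs) p

theorem segR_cons_digit (d : Char) (ds : List Char) (h : PySem.Chars.isdigit d = true) :
    segR (d :: ds) = match segR ds with | [] => [[d]] | h' :: t => (d :: h') :: t := by
  simp [segR, h]

theorem segR_cons_nondigit (d : Char) (ds : List Char) (h : ¬ PySem.Chars.isdigit d = true) :
    segR (d :: ds) = [] :: segR ds := by
  simp [segR, h]

theorem segR_ne_nil (cs : List Char) : segR cs ≠ [] := by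
  cases cs with
  | nil => simp [segR]
  | cons c cs =>
    by_cases h : PySem.Chars.isdigit c = true
    · rw [segR_cons_digit c cs h]; cases segR cs <;> simp
    · rw [segR_cons_nondigit c cs h]; simp

theorem appLast_cons_of_ne_nil (x : List Char) (xs : List (List Char)) (p : List Char)
    (h : xs ≠ []) : appLast (x :: xs) p = x :: appLast xs p := by
  cases xs with
  | nil => simp at h
  | cons y ys => rfl

theorem appLast_ne_nil (xs : List (List Char)) (p : List Char) : appLast xs p ≠ [] := by
  cases xs with
  | nil => simp [appLast]
  | cons x ys =>
    cases ys with
    | nil => simp [appLast]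
    | cons y zs => simp [appLast]

theorem appLast_nil_right (xs : List (List Char)) (h : xs ≠ []) : appLast xs [] = xs := by
  induction xs with
  | nil => simp at h
  | cons x xs ih =>
    cases xs with
    | nil => simp [appLast]
    | cons y ys =>
      rw [appLast_cons_of_ne_nil x (y :: ys) [] (by simp), ih (by simp)]

theorem appLast_appLast (xs : List (List Char)) (q p : List Char) :
    appLast (appLast xs q) p = appLast xs (q ++ p) := by
  induction xs with
  | nil => simp [appLast]
  | cons x xs ih =>
    cases xs with
    | nil => simp [appLast]
    | cons y ys =>
      rw [appLast_cons_of_ne_nil x (y :: ys) q (by simp),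
        appLast_cons_of_ne_nil x (appLast (y :: ys) q) p (appLast_ne_nil _ _),
        appLast_cons_of_ne_nil x (y :: ys) (q ++ p) (by simp), ih]

theorem appLast_append_singleton (xs : List (List Char)) (x p : List Char) :
    appLast (xs ++ [x]) p = xs ++ [x ++ p] := by
  induction xs with
  | nil => simp [appLast]
  | cons y ys ih =>
    rw [List.cons_append, appLast_cons_of_ne_nil y (ys ++ [x]) p (by simp), ih,
      List.cons_append]

theorem segR_append_digit (cs : List Char) (c : Char) (h : PySem.Chars.isdigit c = true) :
    segR (cs ++ [c]) = appLast (segR cs) [c] := by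
  induction cs with
  | nil => simp [segR, appLast, h]
  | cons d ds ih =>
    rw [List.cons_append]
    by_cases hd : PySem.Chars.isdigit d = true
    · rw [segR_cons_digit d (ds ++ [c]) hd, segR_cons_digit d ds hd, ih]
      cases hs : segR ds with
      | nil => exact absurd hs (segR_ne_nil ds)
      | cons s ss =>
        cases ss with
        | nil => simp [appLast]
        | cons t ts =>
          rw [appLast_cons_of_ne_nil s (t :: ts) [c] (by simp)]
          rfl
    · rw [segR_cons_nondigit d (ds ++ [c]) hd, segR_cons_nondigit d ds hd, ih,
        appLast_cons_of_ne_nil [] (segR ds) [c] (segR_ne_nil ds)]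


theorem segR_append_nondigit (cs : List Char) (c : Char) (h : ¬ PySem.Chars.isdigit c = true) :
    segR (cs ++ [c]) = segR cs ++ [[]] := by
  induction cs with
  | nil => simp [segR, h]
  | cons d ds ih =>
    rw [List.cons_append]
    by_cases hd : PySem.Chars.isdigit d = true
    · rw [segR_cons_digit d (ds ++ [c]) hd, segR_cons_digit d ds hd, ih]
      cases hs : segR ds with
      | nil => exact absurd hs (segR_ne_nil ds)
      | cons s ss => rfl
    · rw [segR_cons_nondigit d (ds ++ [c]) hd, segR_cons_nondigit d ds hd, ih]
      rfl

-- Phase 1 of B builds exactly segR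
theorem tokB_spec (cs : List Char) :
    (cs.foldl tokB ([], [])).1 ++ [(cs.foldl tokB ([], [])).2] = segR cs := by
  induction cs using List.reverseRecOn with
  | nil => simp [segR]
  | append_singleton cs c ih =>
    rw [List.foldl_append, List.foldl_cons, List.foldl_nil]
    by_cases h : PySem.Chars.isdigit c = true
    · rw [show tokB (cs.foldl tokB ([], [])) c =
          ((cs.foldl tokB ([], [])).1, (cs.foldl tokB ([], [])).2 ++ [c]) from by
        simp [tokB, h]]
      rw [segR_append_digit cs c h, ← ih, appLast_append_singleton]
    · rw [show tokB (cs.foldl tokB ([], [])) c =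
          ((cs.foldl tokB ([], [])).1 ++ [(cs.foldl tokB ([], [])).2], ([] : List Char)) from by
        simp [tokB, h]]
      rw [segR_append_nondigit cs c h, ← ih]

-- character-level step equivalent to stepA once the index is resolved
def gstep (st : Option (List Int × Int × List Char)) (c : Char) :
    Option (List Int × Int × List Char) :=
  match st with
  | none => none
  | some (timeParts, tracker, part) =>
    if PySem.Chars.isdigit c then some (timeParts, tracker, c :: part)
    else
      match PySem.Int.ofChars? part with
      | none => none
      | some v =>
        match PySem.List.pySet? timeParts tracker v with
        | none => none
        | some tp => some (tp, tracker - 1, ([] : List Char))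

theorem foldl_stepA_none (cs : List Char) (l : List Int) : l.foldl (stepA cs) none = none := by
  induction l with
  | nil => rfl
  | cons x xs ih => simpa [List.foldl_cons, stepA] using ih

theorem foldl_placeB_none (l : List (List Char)) : l.foldl placeB none = none := by
  induction l with
  | nil => rfl
  | cons x xs ih => simpa [List.foldl_cons, placeB] using ih

-- the backward index loop of A over cs ++ [c] = one gstep with c, then the loop over cs
theorem foldA_append (cs : List Char) (c : Char) (st : Option (List Int × Int × List Char)) :
    (PySem.List.pyRange ((cs.length : Int) + 1 - 1) (-1) (-1)).foldl (stepA (cs ++ [c])) st =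
    (PySem.List.pyRange ((cs.length : Int) - 1) (-1) (-1)).foldl (stepA cs) (gstep st c) := by
  rw [show ((cs.length : Int) + 1 - 1) = (cs.length : Int) by ring]
  rw [PySem.List.pyRange_neg_one_cons (by omega)]
  rw [List.foldl_cons]
  have h1 : stepA (cs ++ [c]) st (cs.length : Int) = gstep st c := by
    cases st with
    | none => rfl
    | some s =>
      obtain ⟨tp, tr, part⟩ := s
      simp only [stepA, gstep, PySem.List.pyGet?_natCast, List.getElem?_concat_length]
  rw [h1]
  apply PySem.List.foldl_congr_mem
  intro acc x hx
  rw [PySem.List.mem_pyRange_neg_one] at hx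
  have hx0 : 0 ≤ x := by omega
  have hxl : x.toNat < cs.length := by omega
  have e1 : PySem.List.pyGet? (cs ++ [c]) x = PySem.List.pyGet? cs x := by
    rw [PySem.List.pyGet?_of_nonneg (xs := cs ++ [c]) hx0,
      PySem.List.pyGet?_of_nonneg (xs := cs) hx0, List.getElem?_append_left hxl]
  cases acc with
  | none => rfl
  | some s =>
    obtain ⟨tp, tr, part⟩ := s
    simp only [stepA, e1]

-- finalize A's loop state: the trailing timeParts[tracker] = int(part)
def finA (st : Option (List Int × Int × List Char)) : Option (List Int) :=
  match st with
  | none => none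
  | some (timeParts, tracker, part) =>
    match PySem.Int.ofChars? part with
    | none => none
    | some v => PySem.List.pySet? timeParts tracker v

-- MAIN: A's fused backward scan started with run `part` = B's place-fold over the
-- segments of cs with `part` appended to the last one
theorem mainA (cs : List Char) : ∀ (part : List Char) (tp : List Int) (tr : Int),
    finA ((PySem.List.pyRange ((cs.length : Int) - 1) (-1) (-1)).foldl (stepA cs)
        (some (tp, tr, part))) =
    ((appLast (segR cs) part).reverse.foldl placeB (some (tp, tr))).map Prod.fst := by
  induction cs using List.reverseRecOn with
  | nil =>
    intro part tp tr
    rw [show ((([] : List Char).length : Int) - 1) = -1 by simp]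
    rw [PySem.List.pyRange_neg_one_eq_nil (by omega)]
    simp only [List.foldl_nil, finA, segR, appLast, List.nil_append, List.reverse_singleton,
      List.foldl_cons, List.foldl_nil, placeB]
    cases hv : PySem.Int.ofChars? part with
    | none => simp
    | some v =>
      cases hs : PySem.List.pySet? tp tr v with
      | none => simp [hs]
      | some r => simp [hs]
  | append_singleton cs c ih =>
    intro part tp tr
    rw [show (((cs ++ [c]).length : Int) - 1) = ((cs.length : Int) + 1 - 1) by simp]
    rw [foldA_append]
    by_cases h : PySem.Chars.isdigit c = true
    · have hg : gstep (some (tp, tr, part)) c = some (tp, tr, c :: part) := by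
        simp [gstep, h]
      rw [hg, ih (c :: part) tp tr, segR_append_digit cs c h, appLast_appLast]
      rfl
    · have hseg : appLast (segR (cs ++ [c])) part = segR cs ++ [part] := by
        rw [segR_append_nondigit cs c h, appLast_append_singleton]
        simp
      rw [hseg, List.reverse_append, List.reverse_singleton, List.singleton_append,
        List.foldl_cons]
      cases hv : PySem.Int.ofChars? part with
      | none =>
        have h1 : gstep (some (tp, tr, part)) c = none := by simp [gstep, h, hv]
        have h2 : placeB (some (tp, tr)) part = none := by simp [placeB, hv]
        rw [h1, h2, foldl_stepA_none, foldl_placeB_none]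
        rfl
      | some v =>
        cases hs : PySem.List.pySet? tp tr v with
        | none =>
          have h1 : gstep (some (tp, tr, part)) c = none := by simp [gstep, h, hv, hs]
          have h2 : placeB (some (tp, tr)) part = none := by simp [placeB, hv, hs]
          rw [h1, h2, foldl_stepA_none, foldl_placeB_none]
          rfl
        | some tp' =>
          have h1 : gstep (some (tp, tr, part)) c = some (tp', tr - 1, []) := by
            simp [gstep, h, hv, hs]
          have h2 : placeB (some (tp, tr)) part = some (tp', tr - 1) := by
            simp [placeB, hv, hs]
          rw [h1, h2, ih [] tp' (tr - 1), appLast_nil_right _ (segR_ne_nil cs)]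

-- the two ports agree on EVERY string (raising runs map to [] on both sides)
theorem ports_agree (s : String) :
    convertChronometerValue s = convertChronometerValue_alt s := by
  unfold convertChronometerValue convertChronometerValue_alt
  rw [show PySem.Str.len s - 1 = ((s.toList.length : Int) - 1) by simp [PySem.Str.len_eq]]
  have hmain := mainA s.toList [] [0, 0, 0, 0] (-1)
  rw [appLast_nil_right _ (segR_ne_nil s.toList)] at hmain
  rw [tokB_spec s.toList]
  cases hA : (PySem.List.pyRange ((s.toList.length : Int) - 1) (-1) (-1)).foldl (stepA s.toList)
      (some ([0, 0, 0, 0], -1, ([] : List Char))) with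
  | none =>
    rw [hA] at hmain
    simp only [finA] at hmain
    cases hB : (segR s.toList).reverse.foldl placeB (some ([0, 0, 0, 0], -1)) with
    | none => simp
    | some r =>
      rw [hB] at hmain
      simp at hmain
  | some st =>
    obtain ⟨tp, tr, part⟩ := st
    rw [hA] at hmain
    simp only [finA] at hmain
    cases hv : PySem.Int.ofChars? part with
    | none =>
      rw [hv] at hmain
      have hB : (segR s.toList).reverse.foldl placeB (some ([0, 0, 0, 0], -1)) = none := by
        cases hB : (segR s.toList).reverse.foldl placeB (some ([0, 0, 0, 0], -1)) with
        | none => rfl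
        | some r => rw [hB] at hmain; simp at hmain
      simp [hv, hB]
    | some v =>
      simp only [hv] at hmain
      cases hs : PySem.List.pySet? tp tr v with
      | none =>
        rw [hs] at hmain
        have hB : (segR s.toList).reverse.foldl placeB (some ([0, 0, 0, 0], -1)) = none := by
          cases hB : (segR s.toList).reverse.foldl placeB (some ([0, 0, 0, 0], -1)) with
          | none => rfl
          | some r => rw [hB] at hmain; simp at hmain
        simp [hv, hs, hB]
      | some out =>
        rw [hs] at hmain
        cases hB : (segR s.toList).reverse.foldl placeB (some ([0, 0, 0, 0], -1)) with
        | none => rw [hB] at hmain; simp at hmain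
        | some r =>
          rw [hB] at hmain
          simp only [Option.map_some, Option.some_inj] at hmain
          simp [hv, hs, hmain]

-- ===== VERDICT (by name: the statement is the Claim_ definition above) =====
theorem convertChronometerValue_spec : Claim_equal_convertChronometerValue := by
  intro s _ _
  exact ports_agree s
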